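-- pv_equiv track=rewrite | github.com/nohernan/Matematicas_Discretas | sesion01/intro.py | alternatingSums_rec
-- ===== SOURCE A (Python) =====
-- def alternatingSums_rec(a):
--     if (len(a) == 0):
--         return [0, 0]
--     elif (len(a) == 1):
--         return [a[0], 0]
--     else:
--         v1 = a[0] + (alternatingSums_rec(a[2:]))[0]
--         v2 = a[1] + (alternatingSums_rec(a[2:]))[1]
--         return [v1, v2]
-- ===== SOURCE B (Python) =====
-- def alternatingSums_rec(a):
--     ev = 0
--     od = 0
--     even = True
--     for x in a:
--         if even:
--             ev += x
--         else:
--             od += x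
--         even = not even
--     return [ev, od]
-- ===== Notes on version B (the rewrite author's own statement) =====
-- stated objective: alternative
-- what changed: Replaced the branching recursion that recomputes alternatingSums_rec(a[2:]) twice per step with a single linear pass keeping running even/odd sums and a parity toggle.
import Mathlib
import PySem

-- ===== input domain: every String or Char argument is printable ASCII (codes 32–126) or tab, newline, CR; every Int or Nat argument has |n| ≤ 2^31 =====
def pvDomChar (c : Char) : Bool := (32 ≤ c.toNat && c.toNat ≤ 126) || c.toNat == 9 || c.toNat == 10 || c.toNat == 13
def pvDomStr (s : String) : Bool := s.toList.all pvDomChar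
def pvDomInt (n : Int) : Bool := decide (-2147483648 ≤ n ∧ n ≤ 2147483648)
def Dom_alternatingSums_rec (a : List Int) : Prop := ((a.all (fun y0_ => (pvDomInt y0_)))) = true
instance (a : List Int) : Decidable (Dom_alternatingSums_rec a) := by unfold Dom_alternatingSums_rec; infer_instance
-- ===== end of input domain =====

-- B replaces A's branching recursion (which recomputes the tail result twice per step) by one
-- linear pass with running even/odd sums and a parity toggle.

-- ===== PORT A =====
-- A recurses with two calls to alternatingSums_rec(a[2:]); the cases len==0 / len==1 / else
-- become the three pattern-match arms, and a[2:] of x :: y :: rest is rest.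
def alternatingSums_rec : List Int → List Int
  | [] => [0, 0]
  | [x] => [x, 0]
  | x :: y :: rest =>
      let v1 := x + PySem.List.pyGetD (alternatingSums_rec rest) 0 0
      let v2 := y + PySem.List.pyGetD (alternatingSums_rec rest) 1 0
      [v1, v2]

-- ===== PORT B =====
def alternatingSums_rec_alt (a : List Int) : List Int :=
  let s := a.foldl
    (fun (st : Int × Int × Bool) x =>
      if st.2.2 then (st.1 + x, st.2.1, !st.2.2) else (st.1, st.2.1 + x, !st.2.2))
    (0, 0, true)
  [s.1, s.2.1]

-- ===== PRECONDITION & SPEC =====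
def Spec_alternatingSums_rec (a : List Int) (out : List Int) : Prop := out = alternatingSums_rec_alt a
instance (a : List Int) (out : List Int) : Decidable (Spec_alternatingSums_rec a out) := by unfold Spec_alternatingSums_rec; infer_instance

-- ===== CLAIM (what is proved, stated in full; the proofs are below) =====
def Claim_equal_alternatingSums_rec : Prop := ∀ (a : List Int), Dom_alternatingSums_rec a → Spec_alternatingSums_rec a (alternatingSums_rec a)

-- ===== LEMMAS AND PROOFS =====

-- Even-indexed and odd-indexed sums, structurally.
mutual
def evSum : List Int → Int
  | [] => 0
  | x :: xs => x + odSum xs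
def odSum : List Int → Int
  | [] => 0
  | _ :: xs => evSum xs
end

theorem altRec_eq_sums : ∀ a : List Int, alternatingSums_rec a = [evSum a, odSum a]
  | [] => by simp [alternatingSums_rec, evSum, odSum]
  | [x] => by simp [alternatingSums_rec, evSum, odSum]
  | x :: y :: rest => by
      have ih := altRec_eq_sums rest
      simp [alternatingSums_rec, ih, evSum, odSum, PySem.List.pyGetD]

theorem fold_eq_sums (a : List Int) : ∀ e o : Int,
    (a.foldl
      (fun (st : Int × Int × Bool) x =>
        if st.2.2 then (st.1 + x, st.2.1, !st.2.2) else (st.1, st.2.1 + x, !st.2.2))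
      (e, o, true) = (e + evSum a, o + odSum a, decide (a.length % 2 = 0))) ∧
    (a.foldl
      (fun (st : Int × Int × Bool) x =>
        if st.2.2 then (st.1 + x, st.2.1, !st.2.2) else (st.1, st.2.1 + x, !st.2.2))
      (e, o, false) = (e + odSum a, o + evSum a, decide (a.length % 2 = 1))) := by
  induction a with
  | nil => intro e o; simp [evSum, odSum]
  | cons x xs ih =>
      intro e o
      constructor
      · simpa [evSum, odSum, add_assoc, Nat.succ_mod_two_eq_zero_iff] using (ih (e + x) o).2
      · simpa [evSum, odSum, add_assoc, Nat.succ_mod_two_eq_one_iff] using (ih e (o + x)).1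

-- ===== VERDICT (by name: the statement is the Claim_ definition above) =====
theorem alternatingSums_rec_spec : Claim_equal_alternatingSums_rec := by
  intro a _
  show alternatingSums_rec a = alternatingSums_rec_alt a
  rw [altRec_eq_sums, alternatingSums_rec_alt, (fold_eq_sums a 0 0).1]
  simp
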